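-- pv_equiv track=rewrite | github.com/RegCoDev/stromalytix | archive/v0.1.0-pre-pivot/core/bio_process_miner.py | _find_loop_cut
-- ===== SOURCE A (Python) =====
-- def _find_loop_cut(traces, activities):
--     """Check if there's a loop structure."""
--     for trace in traces:
--         if len(trace) != len(set(trace)):
--             # Has repeated activities — potential loop
--             # Simple: separate body (first occurrence activities)
--             # from redo (repeated activities)
--             body = set()
--             redo = set()
--             seen = set()
--             for a in trace:
--                 if a in seen:
--                     redo.add(a)
--                 else:
--                     body.add(a)
--                 seen.add(a)
--             if body and redo:
--                 body_only = body - redo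
--                 if body_only:
--                     return [sorted(body), sorted(redo)]
--     return None
-- ===== SOURCE B (Python) =====
-- def _find_loop_cut(traces, activities):
--     """Check if there's a loop structure (sort-then-scan run grouping)."""
--     for trace in traces:
--         s = sorted(trace)
--         uniq = []
--         redo = []
--         i = 0
--         n = len(s)
--         while i < n:
--             j = i + 1
--             while j < n and s[j] == s[i]:
--                 j += 1
--             uniq.append(s[i])
--             if j - i > 1:
--                 redo.append(s[i])
--             i = j
--         if redo and len(redo) < len(uniq):
--             return [uniq, redo]
--     return None
-- ===== Notes on version B (the rewrite author's own statement) =====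
-- stated objective: alternative
-- what changed: Instead of building seen/body/redo hash sets in one pass and sorting two sets at the end, B sorts each trace first and then scans the sorted list grouping equal runs, so the distinct list and the repeated list come out already in sorted order with no set construction or final sort.
import Mathlib
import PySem

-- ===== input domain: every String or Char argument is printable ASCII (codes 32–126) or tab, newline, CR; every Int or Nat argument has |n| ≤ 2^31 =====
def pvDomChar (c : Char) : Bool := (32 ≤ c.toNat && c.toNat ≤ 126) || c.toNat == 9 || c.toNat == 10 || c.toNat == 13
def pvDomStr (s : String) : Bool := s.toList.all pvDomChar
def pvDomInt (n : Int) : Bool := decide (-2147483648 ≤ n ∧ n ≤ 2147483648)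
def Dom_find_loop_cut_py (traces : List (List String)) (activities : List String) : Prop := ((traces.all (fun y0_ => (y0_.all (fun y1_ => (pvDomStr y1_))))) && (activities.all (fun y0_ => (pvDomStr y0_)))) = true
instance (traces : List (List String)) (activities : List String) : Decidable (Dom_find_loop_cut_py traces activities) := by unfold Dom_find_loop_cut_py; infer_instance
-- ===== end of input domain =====

-- B replaces A's one-pass seen/body/redo hash-set construction (plus two final sorts)
-- by sort-then-scan: sort the trace first, then group equal runs of the sorted list,
-- so the distinct and repeated lists come out already sorted (objective: alternative).

-- ===== PORT A =====
-- the inner 'for a in trace' loop of A, over the state (body, redo, seen)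
def pvFoldA (trace : List String) : PySem.Set String × PySem.Set String × PySem.Set String :=
  trace.foldl
    (fun st a =>
      if PySem.Set.contains st.2.2 a then
        (st.1, PySem.Set.add st.2.1 a, PySem.Set.add st.2.2 a)
      else
        (PySem.Set.add st.1 a, st.2.1, PySem.Set.add st.2.2 a))
    (PySem.Set.empty, PySem.Set.empty, PySem.Set.empty)

def find_loop_cut_py (traces : List (List String)) (activities : List String) : Option (List (List String)) :=
  match traces with
  | [] => none
  | trace :: rest =>
    if trace.length ≠ (PySem.Set.ofList trace).length then
      let st := pvFoldA trace
      let body := st.1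
      let redo := st.2.1
      if body ≠ [] ∧ redo ≠ [] then
        let body_only := PySem.Set.diff body redo
        if body_only ≠ [] then
          some [PySem.List.sorted body (fun x => x) false, PySem.List.sorted redo (fun x => x) false]
        else find_loop_cut_py rest activities
      else find_loop_cut_py rest activities
    else find_loop_cut_py rest activities

-- ===== PORT B =====
-- B's inner index scan over the sorted list: each step consumes one run of equal
-- elements (the inner 'while s[j] == s[i]' advance is the takeWhile/dropWhile split),
-- appends the run's element to uniq, and to redo when the run is longer than 1
def pvScan : List String → List String × List String
  | [] => ([], [])
  | x :: xs =>
    (x :: (pvScan (xs.dropWhile (· == x))).1,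
     if (xs.takeWhile (· == x)).length + 1 > 1 then x :: (pvScan (xs.dropWhile (· == x))).2
     else (pvScan (xs.dropWhile (· == x))).2)
termination_by s => s.length
decreasing_by
  simp only [List.length_cons]
  exact Nat.lt_succ_of_le (List.length_dropWhile_le _ xs)

def find_loop_cut_py_alt (traces : List (List String)) (activities : List String) : Option (List (List String)) :=
  match traces with
  | [] => none
  | trace :: rest =>
    let res := pvScan (PySem.List.sorted trace (fun x => x) false)
    if res.2 ≠ [] ∧ res.2.length < res.1.length then
      some [res.1, res.2]
    else find_loop_cut_py_alt rest activities

-- ===== PRECONDITION & SPEC =====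
def Spec_find_loop_cut_py (traces : List (List String)) (activities : List String) (out : Option (List (List String))) : Prop := out = find_loop_cut_py_alt traces activities
instance (traces : List (List String)) (activities : List String) (out : Option (List (List String))) : Decidable (Spec_find_loop_cut_py traces activities out) := by unfold Spec_find_loop_cut_py; infer_instance

-- ===== CLAIM (what is proved, stated in full; the proofs are below) =====
def Claim_equal_find_loop_cut_py : Prop := ∀ (traces : List (List String)) (activities : List String), Dom_find_loop_cut_py traces activities → Spec_find_loop_cut_py traces activities (find_loop_cut_py traces activities)

-- ===== LEMMAS AND PROOFS =====

-- invariant of A's inner loop: body = seen = set(trace), redo = the repeated elements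
theorem pvFoldA_inv (t : List String) :
    (pvFoldA t).1 = PySem.Set.ofList t ∧ (pvFoldA t).2.2 = PySem.Set.ofList t ∧
    (pvFoldA t).2.1.Nodup ∧ (∀ x, x ∈ (pvFoldA t).2.1 ↔ 2 ≤ t.count x) := by
  induction t using List.reverseRecOn with
  | nil => simp [pvFoldA, PySem.Set.empty, PySem.Set.ofList]
  | append_singleton p a IH =>
    obtain ⟨hb, hs, hnd, hm⟩ := IH
    have hfold : pvFoldA (p ++ [a]) =
        (if PySem.Set.contains (pvFoldA p).2.2 a then
          ((pvFoldA p).1, PySem.Set.add (pvFoldA p).2.1 a, PySem.Set.add (pvFoldA p).2.2 a)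
        else
          (PySem.Set.add (pvFoldA p).1 a, (pvFoldA p).2.1, PySem.Set.add (pvFoldA p).2.2 a)) := by
      unfold pvFoldA
      rw [List.foldl_append]
      rfl
    have hof : PySem.Set.ofList (p ++ [a]) = PySem.Set.add (PySem.Set.ofList p) a := by
      rw [PySem.Set.ofList_eq_foldl, PySem.Set.ofList_eq_foldl, List.foldl_append]
      rfl
    have hcount : ∀ x, (p ++ [a]).count x = p.count x + (if a = x then 1 else 0) := by
      intro x
      rw [List.count_append, List.count_singleton]
      simp
    by_cases hap : a ∈ p
    · have hcont : PySem.Set.contains (pvFoldA p).2.2 a = true := by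
        rw [hs]
        exact (PySem.Set.contains_iff (PySem.Set.ofList p) a).mpr ((PySem.Set.mem_ofList p a).mpr hap)
      have haddof : PySem.Set.add (PySem.Set.ofList p) a = PySem.Set.ofList p := by
        simp [PySem.Set.add, hap]
      rw [hfold, hcont, if_pos rfl]
      refine ⟨?_, ?_, PySem.Set.nodup_add _ _ hnd, ?_⟩
      · rw [hof, haddof]; exact hb
      · rw [hof, hs]
      · intro x
        rw [PySem.Set.mem_add, hm x, hcount x]
        by_cases hxa : a = x
        · subst hxa
          have h1 : 1 ≤ p.count a := List.count_pos_iff.mpr hap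
          simp
          omega
        · have hxa' : ¬ x = a := fun h => hxa h.symm
          simp [hxa, hxa']
    · have hcont : PySem.Set.contains (pvFoldA p).2.2 a = false := by
        rw [hs]
        simp only [PySem.Set.contains_eq_listContains]
        simpa [List.contains_iff_mem, PySem.Set.mem_ofList] using hap
      rw [hfold, hcont]
      simp only [Bool.false_eq_true, if_false]
      refine ⟨?_, ?_, hnd, ?_⟩
      · rw [hof, hb]
      · rw [hof, hs]
      · intro x
        rw [hm x, hcount x]
        by_cases hxa : a = x
        · subst hxa
          have : p.count a = 0 := List.count_eq_zero.mpr hap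
          simp [this]
        · simp [hxa]

theorem length_ofList_eq_iff (t : List String) :
    (PySem.Set.ofList t).length = t.length ↔ t.Nodup := by
  constructor
  · intro h
    have htf : (PySem.Set.ofList t).toFinset = t.toFinset := by
      ext x
      simp [List.mem_toFinset, PySem.Set.mem_ofList]
    have h1 : (PySem.Set.ofList t).toFinset.card = (PySem.Set.ofList t).length :=
      List.toFinset_card_of_nodup (PySem.Set.nodup_ofList t)
    have h2 : t.toFinset.card = t.dedup.length := List.card_toFinset t
    have hlen : t.dedup.length = t.length := by
      rw [← h2, ← htf, h1, h]
    have hded : t.dedup = t := (List.dedup_sublist t).eq_of_length hlen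
    exact List.dedup_eq_self.mp hded
  · intro h
    rw [PySem.Set.ofList_eq_self_of_nodup t h]

-- what B's run scan produces on a sorted (Pairwise ≤) list: uniq is the strictly
-- increasing list of its elements, and redo is its filter to the repeated ones
theorem pvScan_spec : ∀ (n : Nat) (s : List String), s.length ≤ n →
    s.Pairwise (· ≤ ·) →
    (pvScan s).1.Pairwise (· < ·) ∧ (∀ x, x ∈ (pvScan s).1 ↔ x ∈ s) ∧
    (pvScan s).2 = (pvScan s).1.filter (fun y => decide (1 < s.count y))
  | _, [], _, _ => by simp [pvScan]
  | 0, x :: xs, hlen, _ => by simp at hlen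
  | n + 1, x :: xs, hlen, hp => by
    obtain ⟨hx_le, hxs_pair⟩ := List.pairwise_cons.mp hp
    have hrest_sub : (xs.dropWhile (· == x)).Sublist xs := List.dropWhile_sublist _
    have hrest_pair : (xs.dropWhile (· == x)).Pairwise (· ≤ ·) :=
      List.Pairwise.sublist hrest_sub hxs_pair
    have hrest_len : (xs.dropWhile (· == x)).length ≤ n :=
      le_trans (List.length_dropWhile_le _ xs) (by simpa using hlen)
    obtain ⟨ih1, ih2, ih3⟩ := pvScan_spec n (xs.dropWhile (· == x)) hrest_len hrest_pair
    have hx_notin : x ∉ xs.dropWhile (· == x) := by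
      intro hxm
      cases hre : xs.dropWhile (· == x) with
      | nil => rw [hre] at hxm; exact List.not_mem_nil hxm
      | cons r rr =>
        have hhead := List.head?_dropWhile_not (· == x) xs
        rw [hre] at hhead
        simp only [List.head?_cons] at hhead
        have hrx : r ≠ x := by simpa using hhead
        have hr_mem : r ∈ xs := hrest_sub.subset (hre ▸ List.mem_cons_self)
        have hxr : x ≤ r := hx_le r hr_mem
        rw [hre] at hxm
        rcases List.mem_cons.mp hxm with h | h
        · exact hrx h.symm
        · have hrlex : r ≤ x :=
            (List.pairwise_cons.mp (hre ▸ hrest_pair)).1 x h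
          exact hrx (le_antisymm hrlex hxr)
    have hrun_all : ∀ y ∈ xs.takeWhile (· == x), y = x := by
      intro y hy
      have := List.mem_takeWhile_imp hy
      simpa using this
    have hxs_eq : xs = xs.takeWhile (· == x) ++ xs.dropWhile (· == x) :=
      List.takeWhile_append_dropWhile.symm
    have hxsplit : xs.count x = (xs.takeWhile (· == x)).length := by
      have h0 : (xs.dropWhile (· == x)).count x = 0 := List.count_eq_zero.mpr hx_notin
      have h1 : (xs.takeWhile (· == x)).count x = (xs.takeWhile (· == x)).length :=
        List.count_eq_length.mpr (fun b hb => by simp [hrun_all b hb])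
      conv_lhs => rw [hxs_eq]
      rw [List.count_append, h0, h1]
      omega
    have hcount_x : (x :: xs).count x = (xs.takeWhile (· == x)).length + 1 := by
      rw [List.count_cons]
      simp only [BEq.rfl, if_true]
      omega
    have hcount_ne : ∀ y, y ≠ x → (x :: xs).count y = (xs.dropWhile (· == x)).count y := by
      intro y hy
      have h0 : (xs.takeWhile (· == x)).count y = 0 :=
        List.count_eq_zero.mpr (fun hmem => hy (hrun_all y hmem))
      have hysplit : xs.count y = (xs.dropWhile (· == x)).count y := by
        conv_lhs => rw [hxs_eq]
        rw [List.count_append, h0]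
        omega
      rw [List.count_cons]
      have hxy : (x == y) = false := by simpa using fun h => hy h.symm
      rw [hxy]
      simp only [Bool.false_eq_true, if_false]
      omega
    have hscan : pvScan (x :: xs) =
        (x :: (pvScan (xs.dropWhile (· == x))).1,
         if (xs.takeWhile (· == x)).length + 1 > 1 then x :: (pvScan (xs.dropWhile (· == x))).2
         else (pvScan (xs.dropWhile (· == x))).2) := by
      rw [pvScan]
    refine ⟨?_, ?_, ?_⟩
    · rw [hscan]
      refine List.pairwise_cons.mpr ⟨?_, ih1⟩
      intro y hy
      have hyr : y ∈ xs.dropWhile (· == x) := (ih2 y).mp hy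
      have hyx : y ∈ xs := hrest_sub.subset hyr
      have h1 : x ≤ y := hx_le y hyx
      have h2 : y ≠ x := fun h => hx_notin (h ▸ hyr)
      exact lt_of_le_of_ne h1 (fun h => h2 h.symm)
    · intro y
      rw [hscan]
      simp only [List.mem_cons, ih2]
      constructor
      · rintro (h | h)
        · exact Or.inl h
        · exact Or.inr (hrest_sub.subset h)
      · rintro (h | h)
        · exact Or.inl h
        · rw [hxs_eq] at h
          rcases List.mem_append.mp h with h | h
          · exact Or.inl (hrun_all y h)
          · exact Or.inr h
    · rw [hscan]
      simp only []
      rw [List.filter_cons]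
      have hpx : (decide (1 < (x :: xs).count x)) = decide ((xs.takeWhile (· == x)).length + 1 > 1) := by
        rw [hcount_x]
      have htail : ((pvScan (xs.dropWhile (· == x))).1).filter (fun y => decide (1 < (x :: xs).count y)) =
          (pvScan (xs.dropWhile (· == x))).2 := by
        rw [ih3]
        apply List.filter_congr
        intro y hy
        have hyr : y ∈ xs.dropWhile (· == x) := (ih2 y).mp hy
        have hyx : y ≠ x := fun h => hx_notin (h ▸ hyr)
        rw [hcount_ne y hyx]
      rw [hpx, htail]
      by_cases hc : (xs.takeWhile (· == x)).length + 1 > 1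
      · simp [hc]
      · simp [hc]

theorem main_eq (traces : List (List String)) (activities : List String) :
    find_loop_cut_py traces activities = find_loop_cut_py_alt traces activities := by
  induction traces with
  | nil => rfl
  | cons t rest IH =>
    obtain ⟨hb, hs, hnd, hm⟩ := pvFoldA_inv t
    have hp : (PySem.List.sorted t (fun x => x) false).Pairwise (· ≤ ·) := by
      simpa using PySem.List.sorted_pairwise t (fun x => x)
    have hsp : (PySem.List.sorted t (fun x => x) false).Perm t :=
      PySem.List.sorted_perm t (fun x => x) false
    have hcnt : ∀ y, (PySem.List.sorted t (fun x => x) false).count y = t.count y :=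
      fun y => hsp.count_eq y
    obtain ⟨hU_lt, hU_mem, hR_eq⟩ :=
      pvScan_spec (PySem.List.sorted t (fun x => x) false).length
        (PySem.List.sorted t (fun x => x) false) le_rfl hp
    have hU_nodup : (pvScan (PySem.List.sorted t (fun x => x) false)).1.Nodup :=
      hU_lt.imp ne_of_lt
    have hUt : ∀ y, y ∈ (pvScan (PySem.List.sorted t (fun x => x) false)).1 ↔ y ∈ t :=
      fun y => (hU_mem y).trans hsp.mem_iff
    have hR_mem : ∀ y, y ∈ (pvScan (PySem.List.sorted t (fun x => x) false)).2 ↔ 2 ≤ t.count y := by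
      intro y
      rw [hR_eq, List.mem_filter]
      constructor
      · rintro ⟨-, h2⟩
        have := of_decide_eq_true h2
        rw [hcnt y] at this
        omega
      · intro h
        have hyt : y ∈ t := List.count_pos_iff.mp (by omega)
        refine ⟨(hUt y).mpr hyt, decide_eq_true ?_⟩
        rw [hcnt y]
        omega
    have hR_nodup : (pvScan (PySem.List.sorted t (fun x => x) false)).2.Nodup := by
      rw [hR_eq]; exact hU_nodup.filter _
    rw [find_loop_cut_py, find_loop_cut_py_alt]
    by_cases hQ : (¬ t.Nodup) ∧ ∃ x ∈ t, t.count x = 1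
    · obtain ⟨hdup, x1, hx1m, hx1c⟩ := hQ
      obtain ⟨x2, hx2⟩ : ∃ x, 2 ≤ t.count x := by
        by_contra hno
        refine hdup (List.nodup_iff_count_le_one.mpr (fun a => ?_))
        by_contra hca
        exact hno ⟨a, by omega⟩
      have hx2m : x2 ∈ t := List.count_pos_iff.mp (by omega)
      have hlen : t.length ≠ (PySem.Set.ofList t).length := by
        intro h
        exact hdup ((length_ofList_eq_iff t).mp h.symm)
      have hbody : (pvFoldA t).1 ≠ [] := by
        rw [hb]
        intro h
        exact List.not_mem_nil (h ▸ (PySem.Set.mem_ofList _ _).mpr hx1m)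
      have hredoA : (pvFoldA t).2.1 ≠ [] := by
        intro h
        exact List.not_mem_nil (h ▸ (hm x2).mpr hx2)
      have hdiff : PySem.Set.diff (pvFoldA t).1 (pvFoldA t).2.1 ≠ [] := by
        intro h
        have hx1d : x1 ∈ PySem.Set.diff (pvFoldA t).1 (pvFoldA t).2.1 := by
          rw [PySem.Set.mem_diff]
          refine ⟨hb ▸ (PySem.Set.mem_ofList _ _).mpr hx1m, fun hx => ?_⟩
          have := (hm x1).mp hx
          omega
        exact List.not_mem_nil (h ▸ hx1d)
      have hRne : (pvScan (PySem.List.sorted t (fun x => x) false)).2 ≠ [] := by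
        intro h
        exact List.not_mem_nil (h ▸ (hR_mem x2).mpr hx2)
      have hRlt : (pvScan (PySem.List.sorted t (fun x => x) false)).2.length <
          (pvScan (PySem.List.sorted t (fun x => x) false)).1.length := by
        refine lt_of_le_of_ne (hR_eq ▸ List.filter_sublist.length_le) ?_
        intro hleq
        have hfe : ((pvScan (PySem.List.sorted t (fun x => x) false)).1).filter
            (fun y => decide (1 < (PySem.List.sorted t (fun x => x) false).count y)) =
            (pvScan (PySem.List.sorted t (fun x => x) false)).1 :=
          List.filter_sublist.eq_of_length (by rw [← hR_eq]; exact hleq)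
        have hx1U : x1 ∈ (pvScan (PySem.List.sorted t (fun x => x) false)).1 := (hUt x1).mpr hx1m
        have hx1f := hfe ▸ hx1U
        have := (List.mem_filter.mp hx1f).2
        have := of_decide_eq_true this
        rw [hcnt x1, hx1c] at this
        omega
      rw [if_pos hlen, if_pos ⟨hbody, hredoA⟩, if_pos hdiff, if_pos ⟨hRne, hRlt⟩]
      have h1 : PySem.List.sorted (pvFoldA t).1 (fun x => x) false =
          (pvScan (PySem.List.sorted t (fun x => x) false)).1 := by
        rw [hb]
        refine PySem.List.sorted_eq_of_perm_of_pairwise_lt _ _ _ ?_ hU_lt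
        refine (List.perm_ext_iff_of_nodup hU_nodup (PySem.Set.nodup_ofList t)).mpr ?_
        intro y
        rw [hUt y, PySem.Set.mem_ofList]
      have h2 : PySem.List.sorted (pvFoldA t).2.1 (fun x => x) false =
          (pvScan (PySem.List.sorted t (fun x => x) false)).2 := by
        refine PySem.List.sorted_eq_of_perm_of_pairwise_lt _ _ _ ?_ (hR_eq ▸ hU_lt.filter _)
        refine (List.perm_ext_iff_of_nodup hR_nodup hnd).mpr ?_
        intro y
        rw [hR_mem y, hm y]
      rw [h1, h2]
    · have hBfail : ¬ ((pvScan (PySem.List.sorted t (fun x => x) false)).2 ≠ [] ∧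
          (pvScan (PySem.List.sorted t (fun x => x) false)).2.length <
          (pvScan (PySem.List.sorted t (fun x => x) false)).1.length) := by
        rintro ⟨hrne, hlt⟩
        obtain ⟨y2, hy2⟩ := List.exists_mem_of_ne_nil _ hrne
        have hc2 : 2 ≤ t.count y2 := (hR_mem y2).mp hy2
        have hdup : ¬ t.Nodup := fun hnod => by
          have := List.nodup_iff_count_le_one.mp hnod y2
          omega
        have hne : ((pvScan (PySem.List.sorted t (fun x => x) false)).1).filter
            (fun y => decide (1 < (PySem.List.sorted t (fun x => x) false).count y)) ≠
            (pvScan (PySem.List.sorted t (fun x => x) false)).1 := by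
          intro h
          rw [hR_eq, h] at hlt
          omega
        obtain ⟨y1, hy1U, hy1p⟩ : ∃ y ∈ (pvScan (PySem.List.sorted t (fun x => x) false)).1,
            ¬ (decide (1 < (PySem.List.sorted t (fun x => x) false).count y) = true) := by
          by_contra hall
          refine hne (List.filter_eq_self.mpr ?_)
          intro y hy
          by_contra hnp
          exact hall ⟨y, hy, hnp⟩
        have hy1t : y1 ∈ t := (hUt y1).mp hy1U
        have hle1 : t.count y1 ≤ 1 := by
          by_contra hgt
          exact hy1p (decide_eq_true (by rw [hcnt y1]; omega))
        have hge1 : 1 ≤ t.count y1 := List.count_pos_iff.mpr hy1t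
        exact hQ ⟨hdup, y1, hy1t, by omega⟩
      rw [if_neg hBfail]
      by_cases hdup : t.Nodup
      · rw [if_neg (by rw [(length_ofList_eq_iff t).mpr hdup]; simp), IH]
      · have hnone : ¬ ∃ x ∈ t, t.count x = 1 := fun h => hQ ⟨hdup, h⟩
        have hdiffnil : PySem.Set.diff (pvFoldA t).1 (pvFoldA t).2.1 = [] := by
          rw [List.eq_nil_iff_forall_not_mem]
          intro x hx
          rw [PySem.Set.mem_diff, hb, PySem.Set.mem_ofList, hm x] at hx
          obtain ⟨hxt, hxc⟩ := hx
          have h1 : 1 ≤ t.count x := List.count_pos_iff.mpr hxt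
          exact hnone ⟨x, hxt, by omega⟩
        by_cases hlen : t.length ≠ (PySem.Set.ofList t).length
        · rw [if_pos hlen]
          by_cases hbr : (pvFoldA t).1 ≠ [] ∧ (pvFoldA t).2.1 ≠ []
          · rw [if_pos hbr, if_neg (by simpa using hdiffnil), IH]
          · rw [if_neg hbr, IH]
        · rw [if_neg hlen, IH]

-- ===== VERDICT (by name: the statement is the Claim_ definition above) =====
theorem find_loop_cut_py_spec : Claim_equal_find_loop_cut_py := by
  intro traces activities _
  unfold Spec_find_loop_cut_py
  exact main_eq traces activities
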